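-- pv_equiv track=rewrite | github.com/kudriavtcevroman/Education_itmo | Project 1_5B.py | arg
-- ===== SOURCE A (Python) =====
-- def arg(lst: list):
--     volume = ([], [])
--     for num in lst:
--         if num == None:
--             continue
--         else:
--             if int(num) >= 0:
--                 volume[1].append(int(num))
--             else:
--                 volume[0].append(int(num))
--     volume[0].sort(reverse=True)
--     volume[1].sort()
--     return volume
-- ===== SOURCE B (Python) =====
-- def arg(lst: list):
--     s = sorted(int(num) for num in lst if not (num == None))
--     nonneg = [x for x in s if x >= 0]
--     neg = [x for x in s if x < 0]
--     return (neg[::-1], nonneg)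
-- ===== Notes on version B (the rewrite author's own statement) =====
-- stated objective: alternative
-- what changed: B sorts all non-None values once ascending and splits the sorted list in one pass, reversing the negative part, instead of A's append-into-two-buckets loop followed by two separate sorts.
import Mathlib
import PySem

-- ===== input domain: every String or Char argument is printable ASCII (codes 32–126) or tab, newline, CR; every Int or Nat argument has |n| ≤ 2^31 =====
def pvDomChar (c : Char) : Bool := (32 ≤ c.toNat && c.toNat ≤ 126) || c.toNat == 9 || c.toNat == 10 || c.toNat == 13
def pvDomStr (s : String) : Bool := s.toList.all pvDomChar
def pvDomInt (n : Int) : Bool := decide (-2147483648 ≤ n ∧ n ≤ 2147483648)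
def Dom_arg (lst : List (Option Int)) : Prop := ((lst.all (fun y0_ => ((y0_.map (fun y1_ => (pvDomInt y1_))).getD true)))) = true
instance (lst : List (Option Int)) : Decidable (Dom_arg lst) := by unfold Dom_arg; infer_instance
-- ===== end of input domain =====

-- B sorts all non-None values once ascending and splits the sorted list in one pass (negatives reversed), instead of A's two-bucket loop plus two sorts; return value only.


-- ===== PORT A =====
def arg (lst : List (Option Int)) : List Int × List Int :=
  let volume := lst.foldl (fun (v : List Int × List Int) num =>
    match num with
    | none => v                                  -- 'if num == None: continue'
    | some n =>
        if n ≥ 0 then (v.1, v.2 ++ [n])          -- volume[1].append(int(num))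
        else (v.1 ++ [n], v.2)) ([], [])         -- volume[0].append(int(num))
  (PySem.List.sorted volume.1 (fun x => x) true,  -- volume[0].sort(reverse=True)
   PySem.List.sorted volume.2 (fun x => x) false) -- volume[1].sort()

-- ===== PORT B =====
def arg_alt (lst : List (Option Int)) : List Int × List Int :=
  let s := PySem.List.sorted (lst.filterMap (fun num => num)) (fun x => x) false
  let nonneg := s.filter (fun x => decide (x ≥ 0))
  let neg := s.filter (fun x => decide (x < 0))
  (neg.reverse, nonneg)

-- ===== PRECONDITION & SPEC =====
def Spec_arg (lst : List (Option Int)) (out : List Int × List Int) : Prop := out = arg_alt lst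
instance (lst : List (Option Int)) (out : List Int × List Int) : Decidable (Spec_arg lst out) := by unfold Spec_arg; infer_instance

-- ===== CLAIM (what is proved, stated in full; the proofs are below) =====
def Claim_equal_arg : Prop := ∀ (lst : List (Option Int)), Dom_arg lst → Spec_arg lst (arg lst)

-- ===== LEMMAS AND PROOFS =====

-- A's loop builds exactly (negatives of vals, nonnegatives of vals) in input order.
theorem arg_foldl_filter (lst : List (Option Int)) (acc : List Int × List Int) :
    lst.foldl (fun (v : List Int × List Int) num =>
      match num with
      | none => v
      | some n =>
          if n ≥ 0 then (v.1, v.2 ++ [n])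
          else (v.1 ++ [n], v.2)) acc
    = (acc.1 ++ (lst.filterMap (fun num => num)).filter (fun x => decide (x < 0)),
       acc.2 ++ (lst.filterMap (fun num => num)).filter (fun x => decide (x ≥ 0))) := by
  induction lst generalizing acc with
  | nil => simp
  | cons h t ih =>
    cases h with
    | none => simp [List.foldl, ih]
    | some n =>
      by_cases hn : n ≥ 0 <;> simp [List.foldl, ih, hn, not_le.mp]

theorem filter_sorted_eq (p : Int → Bool) (xs : List Int) :
    (PySem.List.sorted xs (fun x => x) false).filter p
      = PySem.List.sorted (xs.filter p) (fun x => x) false := by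
  exact Eq.symm <| PySem.List.sorted_id_eq_of_perm_of_pairwise _ _
    ((PySem.List.sorted_perm xs _ _).filter p)
    (List.Pairwise.sublist List.filter_sublist (PySem.List.sorted_pairwise xs _))

theorem rev_filter_eq (xs : List Int) :
    ((PySem.List.sorted xs (fun x => x) false).filter (fun x => decide (x < 0))).reverse
      = PySem.List.sorted (xs.filter (fun x => decide (x < 0))) (fun x => x) true := by
  refine PySem.List.eq_of_perm_of_pairwise_le_of_injective (key := fun x : Int => -x)
    (fun a b h => by simpa using h) ?_ ?_ ?_
  · refine List.Perm.trans (List.reverse_perm _) ?_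
    refine List.Perm.trans ((PySem.List.sorted_perm xs _ _).filter _) ?_
    exact (PySem.List.sorted_perm _ _ _).symm
  · have h := List.Pairwise.sublist (l₁ := (PySem.List.sorted xs (fun x => x) false).filter (fun x => decide (x < 0))) List.filter_sublist
      (PySem.List.sorted_pairwise xs (fun x => x))
    simpa [List.pairwise_reverse] using h.imp (by intro a b hab; simpa using hab)
  · exact (PySem.List.sorted_pairwise_rev _ _).imp (by intro a b hab; simpa using hab)

-- ===== VERDICT (by name: the statement is the Claim_ definition above) =====
theorem arg_spec : Claim_equal_arg := by
  intro lst _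
  unfold Spec_arg arg arg_alt
  rw [arg_foldl_filter]
  simp only [List.nil_append]
  rw [rev_filter_eq, filter_sorted_eq]
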